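-- pv_equiv track=rewrite | github.com/KiyotakkkkA/TextRPG | scripts/update_version.py | generate_art
-- ===== SOURCE A (Python) =====
-- def generate_art(text, letters):
--     """Генерирует ASCII-арт из текста."""
--     if not text or not letters:
--         return ""
--
--     # Преобразуем текст в допустимые символы
--     text = ''.join([char if char in letters else ' ' for char in text])
--
--     # Получаем ASCII-арт для каждого символа
--     char_arts = [letters.get(char, letters.get(' ', '')) for char in text]
--
--     # Разбиваем арты по строкам
--     art_lines = [art.split('\n') for art in char_arts]
--
--     # Определяем максимальное количество строк
--     max_lines = max([len(lines) for lines in art_lines], default=0)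
--
--     # Формируем итоговый арт
--     result = []
--     for i in range(max_lines):
--         line = ""
--         for char_lines in art_lines:
--             if i < len(char_lines):
--                 line += char_lines[i] + " "
--             else:
--                 # Если у символа меньше строк, добавляем пробелы
--                 line += " " * (len(char_lines[0]) + 1)
--         result.append(line)
--
--     return '\n'.join(result)
-- ===== SOURCE B (Python) =====
-- def generate_art(text, letters):
--     """Single-pass fold: horizontally concatenate each glyph block into the accumulated rows."""
--     if not text or not letters:
--         return ""
--     rows, pad = [], ""
--     for ch in text:
--         art = letters[ch] if ch in letters else letters.get(' ', '')
--         b = art.split('\n')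
--         w = len(b[0]) + 1
--         h = len(b)
--         n = max(len(rows), h)
--         rows = [(rows[i] if i < len(rows) else pad) + (b[i] + ' ' if i < h else ' ' * w)
--                 for i in range(n)]
--         pad += ' ' * w
--     return '\n'.join(rows)
-- ===== Notes on version B (the rewrite author's own statement) =====
-- stated objective: alternative
-- what changed: Replaces A's staged pipeline (compute all blocks, take the global max height, then a row-index outer loop with an inner per-char conditional scan) by a single left-to-right fold over the text that horizontally concatenates each glyph block into the accumulated rows, carrying a running pad prefix for rows that appear later.
import Mathlib
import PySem

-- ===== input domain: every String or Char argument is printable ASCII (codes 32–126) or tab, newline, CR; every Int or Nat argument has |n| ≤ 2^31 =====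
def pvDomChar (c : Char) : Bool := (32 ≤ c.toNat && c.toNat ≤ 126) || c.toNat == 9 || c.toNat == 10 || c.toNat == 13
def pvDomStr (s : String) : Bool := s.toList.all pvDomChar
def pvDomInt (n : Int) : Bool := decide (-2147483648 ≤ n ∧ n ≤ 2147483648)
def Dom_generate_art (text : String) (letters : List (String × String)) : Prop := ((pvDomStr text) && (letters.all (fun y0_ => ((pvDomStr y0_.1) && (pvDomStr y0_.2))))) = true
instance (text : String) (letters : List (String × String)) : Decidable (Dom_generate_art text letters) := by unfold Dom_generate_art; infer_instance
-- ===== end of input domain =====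

-- B replaces A's staged max+row-index double loop by a single fold over the text that horizontally concatenates glyph blocks; alternative decomposition, same cost.


-- ===== PORT A =====
-- strings handled as their char lists (exact); split('\n') = Chars.splitOn, '\n'.join = Chars.join
def generate_art (text : String) (letters : List (String × String)) : String :=
  if text = "" ∨ letters = [] then ""
  else
    let d := PySem.Dict.mk letters
    let text2 := text.toList.map (fun c => if d.contains (String.ofList [c]) then c else ' ')
    let char_arts := text2.map (fun c => ((d.get? (String.ofList [c])).getD ((d.get? " ").getD "")).toList)
    let art_lines := char_arts.map (fun a => PySem.Chars.splitOn a ['\n'])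
    let max_lines := (PySem.List.max? (art_lines.map List.length) (fun x => x)).getD 0
    let result := (List.range max_lines).foldl (fun acc i =>
      acc ++ [art_lines.foldl (fun line cl =>
        if i < cl.length then line ++ cl.getD i [] ++ [' ']
        else line ++ List.replicate ((cl.headD []).length + 1) ' ') []]) ([] : List (List Char))
    String.ofList (PySem.Chars.join ['\n'] result)

-- ===== PORT B =====
-- the glyph block of one character: letters[ch] if present else letters.get(' ',''), split on '\n'
def pvToBlock (letters : List (String × String)) (ch : Char) : List (List Char) :=
  PySem.Chars.splitOn (if (PySem.Dict.mk letters).contains (String.ofList [ch]) then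
                         (((PySem.Dict.mk letters).get? (String.ofList [ch])).getD "").toList
                       else (((PySem.Dict.mk letters).get? " ").getD "").toList) ['\n']

-- Source B's loop body: horizontally concatenate block b onto the accumulated (rows, pad) state
def pvMerge (st : List (List Char) × List Char) (b : List (List Char)) : List (List Char) × List Char :=
  let w := (b.headD []).length + 1
  let h := b.length
  let n := max st.1.length h
  ((List.range n).map (fun i =>
      (if i < st.1.length then st.1.getD i [] else st.2) ++
      (if i < h then b.getD i [] ++ [' '] else List.replicate w ' ')),
   st.2 ++ List.replicate w ' ')

def generate_art_alt (text : String) (letters : List (String × String)) : String :=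
  if text = "" ∨ letters = [] then ""
  else
    let st := text.toList.foldl (fun st ch => pvMerge st (pvToBlock letters ch)) ([], [])
    String.ofList (PySem.Chars.join ['\n'] st.1)

-- ===== PRECONDITION & SPEC =====
def Spec_generate_art (text : String) (letters : List (String × String)) (out : String) : Prop := out = generate_art_alt text letters
instance (text : String) (letters : List (String × String)) (out : String) : Decidable (Spec_generate_art text letters out) := by unfold Spec_generate_art; infer_instance

-- ===== CLAIM (what is proved, stated in full; the proofs are below) =====
def Claim_equal_generate_art : Prop := ∀ (text : String) (letters : List (String × String)), Dom_generate_art text letters → Spec_generate_art text letters (generate_art text letters)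

-- ===== LEMMAS AND PROOFS =====

-- what one block contributes to output row i (A's inner-loop branch)
def pvContrib (i : Nat) (b : List (List Char)) : List Char :=
  if i < b.length then b.getD i [] ++ [' '] else List.replicate ((b.headD []).length + 1) ' '

def pvMaxh (bs : List (List (List Char))) : Nat := bs.foldl (fun a c => max a c.length) 0

theorem pv_le_maxh (bs : List (List (List Char))) : ∀ b ∈ bs, b.length ≤ pvMaxh bs :=
  (PySem.List.le_foldl_max_nat bs List.length 0).2

theorem pv_getD_range_map {α : Type} (f : ℕ → α) (m i : ℕ) (h : i < m) (d : α) :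
    ((List.range m).map f).getD i d = f i := by
  simp [List.getD, h]

-- the invariant of Source B's loop: after folding the blocks bs, rows = the transposed
-- rectangular picture of height pvMaxh bs, pad = one all-space row of full width
theorem pv_fold_merge (bs : List (List (List Char))) :
    bs.foldl pvMerge ([], []) =
    ((List.range (pvMaxh bs)).map (fun i => (bs.map (pvContrib i)).flatten),
     (bs.map (fun b => List.replicate ((b.headD []).length + 1) ' ')).flatten) := by
  induction bs using List.reverseRecOn with
  | nil => simp [pvMaxh]
  | append_singleton bs b ih =>
    rw [List.foldl_append, ih]
    simp only [List.foldl_cons, List.foldl_nil]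
    have hM : pvMaxh (bs ++ [b]) = max (pvMaxh bs) b.length := by
      simp [pvMaxh, List.foldl_append]
    unfold pvMerge
    simp only [List.length_map, List.length_range, hM]
    refine Prod.ext ?_ ?_
    · simp only []
      refine List.map_congr_left fun i hi => ?_
      simp only [List.map_append, List.map_cons, List.map_nil, List.flatten_append,
        List.flatten_cons, List.flatten_nil, List.append_nil]
      congr 1
      · by_cases him : i < pvMaxh bs
        · rw [if_pos him, pv_getD_range_map _ _ _ him]
        · rw [if_neg him]
          refine congrArg List.flatten (List.map_congr_left fun b' hb' => ?_)
          have : ¬ i < b'.length := by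
            have := pv_le_maxh bs b' hb'; omega
          simp [pvContrib, this]
    · simp

-- a foldl that appends f x each step is acc ++ flatten (map f)
theorem pv_foldl_concat {α : Type} (f : α → List Char) :
    ∀ (L : List α) (acc : List Char),
      L.foldl (fun line cl => line ++ f cl) acc = acc ++ (L.map f).flatten := by
  intro L
  induction L with
  | nil => intro acc; simp
  | cons b t ih => intro acc; simp [ih]

theorem pv_flatMap_single {α β : Type} (f : α → β) (l : List α) : l.flatMap (fun x => [f x]) = l.map f := by
  induction l with | nil => simp | cons a t ih => simp [ih]

-- A's glyph lookup after the preliminary replacement pass equals B's pvToBlock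
theorem pv_blockA (letters : List (String × String)) (c : Char) :
    PySem.Chars.splitOn (((PySem.Dict.mk letters).get?
        (String.ofList [if (PySem.Dict.mk letters).contains (String.ofList [c]) then c else ' '])).getD
        (((PySem.Dict.mk letters).get? " ").getD "")).toList ['\n'] = pvToBlock letters c := by
  unfold pvToBlock
  by_cases hc : (PySem.Dict.mk letters).contains (String.ofList [c])
  · rw [if_pos hc, if_pos hc]
    rw [PySem.Dict.contains_eq_isSome_get?] at hc
    cases hq : (PySem.Dict.mk letters).get? (String.ofList [c]) with
    | none => rw [hq] at hc; simp at hc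
    | some v => simp
  · rw [if_neg hc, if_neg hc]
    have hsp : String.ofList [' '] = " " := rfl
    rw [hsp]
    cases (PySem.Dict.mk letters).get? " " <;> simp

-- A's max_lines = the running max Source B maintains
theorem pv_maxA (bs : List (List (List Char))) (h : bs ≠ []) :
    (PySem.List.max? (bs.map List.length) (fun x => x)).getD 0 = pvMaxh bs := by
  cases bs with
  | nil => exact absurd rfl h
  | cons b t =>
    rw [List.map_cons, PySem.List.max?_id_cons, Option.getD_some]
    unfold pvMaxh
    rw [List.foldl_cons, List.foldl_map]
    simp

-- ===== VERDICT (by name: the statement is the Claim_ definition above) =====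
theorem generate_art_spec : Claim_equal_generate_art := by
  intro text letters _
  unfold Spec_generate_art
  by_cases h : text = "" ∨ letters = []
  · simp [generate_art, generate_art_alt, h]
  · simp only [generate_art, generate_art_alt, if_neg h]
    -- B side: rewrite the character fold as a fold of pvMerge over the blocks, then apply the invariant
    have hfm : (text.toList.map (pvToBlock letters)).foldl pvMerge
        (([], []) : List (List Char) × List Char)
        = text.toList.foldl (fun st ch => pvMerge st (pvToBlock letters ch)) ([], []) := by
      rw [List.foldl_map]
    rw [← hfm, pv_fold_merge]
    -- A side: collapse the three maps into the block map
    have hmap :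
        List.map (fun a => PySem.Chars.splitOn a ['\n'])
          (List.map (fun c => (((PySem.Dict.mk letters).get? (String.ofList [c])).getD (((PySem.Dict.mk letters).get? " ").getD "")).toList)
            (List.map (fun c => if (PySem.Dict.mk letters).contains (String.ofList [c]) = true then c else ' ') text.toList))
        = text.toList.map (pvToBlock letters) := by
      simp only [List.map_map]
      refine List.map_congr_left fun c _ => ?_
      exact pv_blockA letters c
    rw [hmap]
    obtain ⟨ht, -⟩ := not_or.mp h
    have htne : text.toList ≠ [] := by
      intro hc
      exact ht (by simpa using congrArg String.ofList hc)
    set bs := text.toList.map (pvToBlock letters) with hbs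
    have hbsne : bs ≠ [] := by
      rw [hbs]; intro hc; exact htne (List.map_eq_nil_iff.mp hc)
    rw [pv_maxA bs hbsne]
    -- A's row loop: foldl-append = map over range, inner foldl = flatten of contributions
    refine congrArg String.ofList (congrArg (PySem.Chars.join ['\n']) ?_)
    rw [PySem.List.foldl_append_eq_flatMap]
    simp only [List.nil_append]
    rw [pv_flatMap_single]
    refine List.map_congr_left fun i _ => ?_
    have hbody : (fun (line : List Char) (cl : List (List Char)) =>
        if i < cl.length then line ++ cl.getD i [] ++ [' ']
        else line ++ List.replicate ((cl.headD []).length + 1) ' ')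
        = fun line cl => line ++ pvContrib i cl := by
      funext line cl; unfold pvContrib; split <;> simp
    rw [hbody, pv_foldl_concat]
    simp
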